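-- pv_equiv track=rewrite | github.com/leylabernie/luxemiashop | build_boutique_csv.py | extract_fabric
-- ===== SOURCE A (Python) =====
-- def extract_fabric(name):
--     fabrics = ['Embosed Velvet', 'Banarasi Jacquard', 'Pure Silk', 'Silk Blend', 'Crepe Silk',
--                'Chinon Silk', 'Shimmer Silk', 'Fendy Silk', 'Art Silk', 'Chinon', 'Georgette',
--                'Lycra', 'Silk']
--     for fabric in sorted(fabrics, key=len, reverse=True):
--         if fabric.lower() in name.lower():
--             return fabric
--     return ''
-- ===== SOURCE B (Python) =====
-- def extract_fabric(name):
--     fabrics = ['Embosed Velvet', 'Banarasi Jacquard', 'Pure Silk', 'Silk Blend', 'Crepe Silk',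
--                'Chinon Silk', 'Shimmer Silk', 'Fendy Silk', 'Art Silk', 'Chinon', 'Georgette',
--                'Lycra', 'Silk']
--     nl = name.lower()
--     best = ''
--     for fabric in fabrics:
--         if fabric.lower() in nl and len(fabric) > len(best):
--             best = fabric
--     return best
-- ===== Notes on version B (the rewrite author's own statement) =====
-- stated objective: simpler
-- what changed: Drops the sort: a single fold over the fabrics in original list order keeps the longest matching fabric seen so far (strict > keeps the earlier one on length ties, matching the stable sort's tie-breaking), instead of sorting by length descending and returning the first match.
import Mathlib
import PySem

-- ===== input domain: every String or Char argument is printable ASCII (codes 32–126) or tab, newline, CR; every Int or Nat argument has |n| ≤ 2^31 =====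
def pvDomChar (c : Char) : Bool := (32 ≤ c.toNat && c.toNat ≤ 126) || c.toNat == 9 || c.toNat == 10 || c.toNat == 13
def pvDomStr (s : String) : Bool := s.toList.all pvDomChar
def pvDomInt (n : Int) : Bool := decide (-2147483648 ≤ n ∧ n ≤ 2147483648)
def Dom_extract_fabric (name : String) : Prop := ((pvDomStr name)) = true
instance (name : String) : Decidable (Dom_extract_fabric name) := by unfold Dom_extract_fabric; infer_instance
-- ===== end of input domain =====

-- B drops the sort: one fold in original list order keeping the longest matching fabric (strict > preserves the stable-sort tie-break); objective: simpler.


-- ===== PORT A =====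
def extract_fabric_loop (nl : String) : List String → String
  | [] => ""
  | f :: rest =>
      if PySem.Str.isIn (PySem.Str.lower f) nl then f else extract_fabric_loop nl rest

-- Port of A: sort by length descending (stable), return the first fabric whose
-- lowercase form occurs in the lowercase name ('name.lower()' is loop-invariant,
-- so it is computed once here; exact).
def extract_fabric (name : String) : String :=
  let fabrics : List String := ["Embosed Velvet", "Banarasi Jacquard", "Pure Silk", "Silk Blend", "Crepe Silk",
    "Chinon Silk", "Shimmer Silk", "Fendy Silk", "Art Silk", "Chinon", "Georgette",
    "Lycra", "Silk"]
  extract_fabric_loop (PySem.Str.lower name)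
    (PySem.List.sorted fabrics (fun f => PySem.Str.len f) true)

-- ===== PORT B =====
-- Port of B: one fold in original list order keeping the longest match so far.
def extract_fabric_alt (name : String) : String :=
  let fabrics : List String := ["Embosed Velvet", "Banarasi Jacquard", "Pure Silk", "Silk Blend", "Crepe Silk",
    "Chinon Silk", "Shimmer Silk", "Fendy Silk", "Art Silk", "Chinon", "Georgette",
    "Lycra", "Silk"]
  let nl := PySem.Str.lower name
  fabrics.foldl
    (fun best f =>
      if PySem.Str.isIn (PySem.Str.lower f) nl && decide (PySem.Str.len best < PySem.Str.len f)
      then f else best) ""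

-- ===== PRECONDITION & SPEC =====
def Spec_extract_fabric (name : String) (out : String) : Prop := out = extract_fabric_alt name
instance (name : String) (out : String) : Decidable (Spec_extract_fabric name out) := by unfold Spec_extract_fabric; infer_instance

-- ===== CLAIM (what is proved, stated in full; the proofs are below) =====
def Claim_equal_extract_fabric : Prop := ∀ (name : String), Dom_extract_fabric name → Spec_extract_fabric name (extract_fabric name)

-- ===== LEMMAS AND PROOFS =====

-- Index tables used only by the proofs: fabric i and its length (0 = the empty "no match" value).
def strA : Nat → String
  | 1 => "Embosed Velvet" | 2 => "Banarasi Jacquard" | 3 => "Pure Silk" | 4 => "Silk Blend"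
  | 5 => "Crepe Silk" | 6 => "Chinon Silk" | 7 => "Shimmer Silk" | 8 => "Fendy Silk"
  | 9 => "Art Silk" | 10 => "Chinon" | 11 => "Georgette" | 12 => "Lycra" | 13 => "Silk" | _ => ""

def lenA : Nat → Nat
  | 1 => 14 | 2 => 17 | 3 => 9 | 4 => 10 | 5 => 10 | 6 => 11 | 7 => 12
  | 8 => 10 | 9 => 8 | 10 => 6 | 11 => 9 | 12 => 5 | 13 => 4 | _ => 0

theorem len_strA : ∀ i, PySem.Str.len (strA i) = lenA i
  | 0 => rfl | 1 => rfl | 2 => rfl | 3 => rfl | 4 => rfl | 5 => rfl | 6 => rfl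
  | 7 => rfl | 8 => rfl | 9 => rfl | 10 => rfl | 11 => rfl | 12 => rfl | 13 => rfl
  | (n+14) => by simp [strA, lenA]

-- The sorted fabric list, named as a literal (stable sort by length, descending).
theorem sorted_fabrics_eq :
    PySem.List.sorted (["Embosed Velvet", "Banarasi Jacquard", "Pure Silk", "Silk Blend", "Crepe Silk",
      "Chinon Silk", "Shimmer Silk", "Fendy Silk", "Art Silk", "Chinon", "Georgette",
      "Lycra", "Silk"] : List String) (fun f => PySem.Str.len f) true
    = ["Banarasi Jacquard", "Embosed Velvet", "Shimmer Silk", "Chinon Silk", "Silk Blend",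
       "Crepe Silk", "Fendy Silk", "Pure Silk", "Georgette", "Art Silk", "Chinon", "Lycra", "Silk"] := by
  decide

-- B's fold over the fabric strings is the image under strA of a fold on (index, matched?) pairs.
theorem fold_pack (nl : String) (L : List Nat) (b : Nat) :
    (L.map strA).foldl
      (fun best f =>
        if PySem.Str.isIn (PySem.Str.lower f) nl && decide (PySem.Str.len best < PySem.Str.len f)
        then f else best) (strA b)
    = strA ((L.map (fun i => (i, PySem.Str.isIn (PySem.Str.lower (strA i)) nl))).foldl
        (fun best p => if p.2 && decide (lenA best < lenA p.1) then p.1 else best) b) := by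
  induction L generalizing b with
  | nil => rfl
  | cons x t ih =>
    simp only [List.map_cons, List.foldl_cons, len_strA, Nat.cast_lt, ← apply_ite strA, ih]

theorem fold_pack0 (nl : String) (L : List Nat) :
    (L.map strA).foldl
      (fun best f =>
        if PySem.Str.isIn (PySem.Str.lower f) nl && decide (PySem.Str.len best < PySem.Str.len f)
        then f else best) ""
    = strA ((L.map (fun i => (i, PySem.Str.isIn (PySem.Str.lower (strA i)) nl))).foldl
        (fun best p => if p.2 && decide (lenA best < lenA p.1) then p.1 else best) 0) :=
  fold_pack nl L 0

-- Both programs abstracted over the 13 substring tests, on the index side: equal for all Booleans.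
set_option maxRecDepth 16384 in
theorem core_nat : ∀ (c1 c2 c3 c4 c5 c6 c7 c8 c9 c10 c11 c12 c13 : Bool),
    (if c2 then 2 else if c1 then 1 else if c7 then 7 else if c6 then 6 else
     if c4 then 4 else if c5 then 5 else if c8 then 8 else if c3 then 3 else
     if c11 then 11 else if c9 then 9 else if c10 then 10 else if c12 then 12 else
     if c13 then 13 else 0)
    = ([(1, c1), (2, c2), (3, c3), (4, c4), (5, c5), (6, c6), (7, c7), (8, c8),
        (9, c9), (10, c10), (11, c11), (12, c12), (13, c13)].foldl
        (fun best p => if p.2 && decide (lenA best < lenA p.1) then p.1 else best) 0) := by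
  decide

-- ===== VERDICT (by name: the statement is the Claim_ definition above) =====
set_option maxHeartbeats 1000000 in
theorem extract_fabric_spec : Claim_equal_extract_fabric := by
  intro name _
  unfold Spec_extract_fabric extract_fabric extract_fabric_alt
  simp only [sorted_fabrics_eq, extract_fabric_loop]
  rw [show (["Embosed Velvet", "Banarasi Jacquard", "Pure Silk", "Silk Blend", "Crepe Silk",
    "Chinon Silk", "Shimmer Silk", "Fendy Silk", "Art Silk", "Chinon", "Georgette",
    "Lycra", "Silk"] : List String)
    = List.map strA [1, 2, 3, 4, 5, 6, 7, 8, 9, 10, 11, 12, 13] from rfl]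
  rw [fold_pack0]
  simp only [List.map_cons, List.map_nil, strA]
  generalize PySem.Str.isIn (PySem.Str.lower "Banarasi Jacquard") (PySem.Str.lower name) = c2
  generalize PySem.Str.isIn (PySem.Str.lower "Embosed Velvet") (PySem.Str.lower name) = c1
  generalize PySem.Str.isIn (PySem.Str.lower "Shimmer Silk") (PySem.Str.lower name) = c7
  generalize PySem.Str.isIn (PySem.Str.lower "Chinon Silk") (PySem.Str.lower name) = c6
  generalize PySem.Str.isIn (PySem.Str.lower "Silk Blend") (PySem.Str.lower name) = c4
  generalize PySem.Str.isIn (PySem.Str.lower "Crepe Silk") (PySem.Str.lower name) = c5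
  generalize PySem.Str.isIn (PySem.Str.lower "Fendy Silk") (PySem.Str.lower name) = c8
  generalize PySem.Str.isIn (PySem.Str.lower "Pure Silk") (PySem.Str.lower name) = c3
  generalize PySem.Str.isIn (PySem.Str.lower "Georgette") (PySem.Str.lower name) = c11
  generalize PySem.Str.isIn (PySem.Str.lower "Art Silk") (PySem.Str.lower name) = c9
  generalize PySem.Str.isIn (PySem.Str.lower "Chinon") (PySem.Str.lower name) = c10
  generalize PySem.Str.isIn (PySem.Str.lower "Lycra") (PySem.Str.lower name) = c12
  generalize PySem.Str.isIn (PySem.Str.lower "Silk") (PySem.Str.lower name) = c13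
  show (if c2 then strA 2 else if c1 then strA 1 else if c7 then strA 7 else
        if c6 then strA 6 else if c4 then strA 4 else if c5 then strA 5 else
        if c8 then strA 8 else if c3 then strA 3 else if c11 then strA 11 else
        if c9 then strA 9 else if c10 then strA 10 else if c12 then strA 12 else
        if c13 then strA 13 else strA 0)
      = strA ([(1, c1), (2, c2), (3, c3), (4, c4), (5, c5), (6, c6), (7, c7), (8, c8),
          (9, c9), (10, c10), (11, c11), (12, c12), (13, c13)].foldl
          (fun best p => if p.2 && decide (lenA best < lenA p.1) then p.1 else best) 0)
  simp only [← apply_ite strA]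
  exact congrArg strA (core_nat c1 c2 c3 c4 c5 c6 c7 c8 c9 c10 c11 c12 c13)
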